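-- pv_equiv track=rewrite | github.com/kieranbarker/advent_of_code_2025 | 06/b.py | split_by_empty_columns
-- ===== SOURCE A (Python) =====
-- def split_by_empty_columns(grid):
--     rows = len(grid)
--     cols = len(grid[0])
--
--     # determine which columns are separators (all rows are ' ')
--     is_sep = [all(grid[r][c] == " " for r in range(rows)) for c in range(cols)]
--
--     results = []
--     start = None
--
--     for c in range(cols):
--         if not is_sep[c]:
--             if start is None:
--                 start = c
--         else:
--             if start is not None:
--                 # slice columns start..c-1
--                 results.append(
--                     [[grid[r][k] for k in range(start, c)] for r in range(rows)]
--                 )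
--                 start = None
--
--     if start is not None:
--         results.append([[grid[r][k] for k in range(start, cols)] for r in range(rows)])
--
--     return results
-- ===== SOURCE B (Python) =====
-- def split_by_empty_columns(grid):
--     rows = len(grid)
--     cols = len(grid[0])
--
--     # column-major view of the grid
--     columns = [[grid[r][c] for r in range(rows)] for c in range(cols)]
--
--     # split the column list on separator columns, like splitting a string on a delimiter
--     groups = []
--     current = []
--     for column in columns:
--         if all(cell == " " for cell in column):
--             if current:
--                 groups.append(current)
--             current = []
--         else:
--             current.append(column)
--     if current:
--         groups.append(current)
--
--     # transpose each group of columns back to row-major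
--     return [[[col[r] for col in group] for r in range(rows)] for group in groups]
-- ===== Notes on version B (the rewrite author's own statement) =====
-- stated objective: alternative
-- what changed: A scans column indices tracking a run-start index and re-slices rows out of the grid at each flush; B materialises a column-major view once, splits the column list on all-blank columns like splitting a string on a delimiter (accumulate/flush of column lists), and transposes each surviving group back to row-major.
import Mathlib
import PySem

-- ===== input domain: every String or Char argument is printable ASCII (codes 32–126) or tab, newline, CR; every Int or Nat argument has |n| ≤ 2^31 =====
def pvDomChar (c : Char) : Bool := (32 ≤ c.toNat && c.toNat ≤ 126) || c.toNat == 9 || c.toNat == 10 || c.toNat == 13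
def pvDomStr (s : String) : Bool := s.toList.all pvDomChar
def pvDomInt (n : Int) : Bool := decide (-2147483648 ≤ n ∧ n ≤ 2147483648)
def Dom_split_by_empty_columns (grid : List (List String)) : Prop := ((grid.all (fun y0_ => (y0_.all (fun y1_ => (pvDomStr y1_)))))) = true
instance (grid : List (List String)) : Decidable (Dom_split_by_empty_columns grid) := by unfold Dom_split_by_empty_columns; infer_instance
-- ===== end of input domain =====

-- B replaces A's run-start index scan with a column-major view split on blank columns and
-- transposed back per group (objective: alternative decomposition, same cost).


-- ===== PORT A =====
-- grid[r][c] (in range under Pre_)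
def pvCell (grid : List (List String)) (r c : Nat) : String := (grid.getD r []).getD c ""

-- [[grid[r][k] for k in range(s, e)] for r in range(rows)]
def pvSliceA (grid : List (List String)) (rows s e : Nat) : List (List String) :=
  (List.range rows).map (fun r => (List.range' s (e - s)).map (fun k => pvCell grid r k))

-- is_sep = [all(grid[r][c] == " " for r in range(rows)) for c in range(cols)]
def pvIsSepL (grid : List (List String)) (rows cols : Nat) : List Bool :=
  (List.range cols).map (fun c => (List.range rows).all (fun r => pvCell grid r c == " "))

-- the body of A's "for c in range(cols)" loop, state = (results, start)
def pvStepA (grid : List (List String)) (rows : Nat) (isSep : List Bool)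
    (st : List (List (List String)) × Option Nat) (c : Nat) :
    List (List (List String)) × Option Nat :=
  if !(isSep.getD c false) then
    match st.2 with
    | none => (st.1, some c)
    | some _ => st
  else
    match st.2 with
    | none => st
    | some s => (st.1 ++ [pvSliceA grid rows s c], none)

-- A's trailing "if start is not None" flush
def pvFinishA (grid : List (List String)) (rows cols : Nat)
    (st : List (List (List String)) × Option Nat) : List (List (List String)) :=
  match st.2 with
  | none => st.1
  | some s => st.1 ++ [pvSliceA grid rows s cols]

def split_by_empty_columns (grid : List (List String)) : List (List (List String)) :=
  let rows := grid.length
  let cols := (grid.headD []).length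
  pvFinishA grid rows cols
    ((List.range cols).foldl (pvStepA grid rows (pvIsSepL grid rows cols)) ([], none))

-- ===== PORT B =====
-- one column: [grid[r][c] for r in range(rows)]
def pvColOf (grid : List (List String)) (rows c : Nat) : List String :=
  (List.range rows).map (fun r => pvCell grid r c)

-- body of B's "for column in columns" loop, state = (groups, current)
def pvStepB (st : List (List (List String)) × List (List String)) (col : List String) :
    List (List (List String)) × List (List String) :=
  if col.all (fun x => x == " ") then
    (if st.2.isEmpty then st.1 else st.1 ++ [st.2], [])
  else
    (st.1, st.2 ++ [col])

-- B's trailing "if current: groups.append(current)"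
def pvFlushB (st : List (List (List String)) × List (List String)) : List (List (List String)) :=
  if st.2.isEmpty then st.1 else st.1 ++ [st.2]

-- [[col[r] for col in group] for r in range(rows)]
def pvTranspose (rows : Nat) (g : List (List String)) : List (List String) :=
  (List.range rows).map (fun r => g.map (fun col => col.getD r ""))

def split_by_empty_columns_alt (grid : List (List String)) : List (List (List String)) :=
  let rows := grid.length
  let cols := (grid.headD []).length
  let columns := (List.range cols).map (pvColOf grid rows)
  (pvFlushB (columns.foldl pvStepB ([], []))).map (pvTranspose rows)

-- ===== PRECONDITION & SPEC =====
-- Pre_ excludes exactly the inputs where Python A raises IndexError: the empty grid (grid[0])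
-- and ragged grids with a row shorter than the first row (grid[r][c] out of range).
def Pre_split_by_empty_columns (grid : List (List String)) : Prop :=
  grid ≠ [] ∧ ∀ row ∈ grid, (grid.headD []).length ≤ row.length
instance (grid : List (List String)) : Decidable (Pre_split_by_empty_columns grid) := by
  unfold Pre_split_by_empty_columns; infer_instance

def pvWitness_split_by_empty_columns : List (List String) :=
  [["a", " ", "b"], [" ", " ", "c"]]

def Spec_split_by_empty_columns (grid : List (List String)) (out : List (List (List String))) : Prop := out = split_by_empty_columns_alt grid
instance (grid : List (List String)) (out : List (List (List String))) : Decidable (Spec_split_by_empty_columns grid out) := by unfold Spec_split_by_empty_columns; infer_instance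

-- ===== CLAIM (what is proved, stated in full; the proofs are below) =====
def Claim_equal_split_by_empty_columns : Prop := ∀ (grid : List (List String)), Dom_split_by_empty_columns grid → Pre_split_by_empty_columns grid → Spec_split_by_empty_columns grid (split_by_empty_columns grid)

-- ===== LEMMAS AND PROOFS =====

-- transposing a block of columns s..s+m-1 yields A's row-major slice
lemma pv_transpose_cols (grid : List (List String)) (rows s m : Nat) :
    pvTranspose rows ((List.range' s m).map (pvColOf grid rows))
      = (List.range rows).map (fun r => (List.range' s m).map (fun k => pvCell grid r k)) := by
  unfold pvTranspose
  refine List.map_congr_left (fun r hr => ?_)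
  rw [List.map_map]
  refine List.map_congr_left (fun k _ => ?_)
  have hr' : r < rows := List.mem_range.mp hr
  simp [pvColOf, List.getD_eq_getElem?_getD, hr']

-- looking up is_sep[c] for c < cols
lemma pv_isSep_getD (grid : List (List String)) (rows cols c : Nat) (hc : c < cols) :
    (pvIsSepL grid rows cols).getD c false
      = (List.range rows).all (fun r => pvCell grid r c == " ") := by
  simp [pvIsSepL, List.getD_eq_getElem?_getD, hc]

-- B's separator test on a materialised column equals A's test on the grid
lemma pv_col_all (grid : List (List String)) (rows c : Nat) :
    (pvColOf grid rows c).all (fun x => x == " ")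
      = (List.range rows).all (fun r => pvCell grid r c == " ") := by
  simp only [pvColOf, List.all_map]
  rfl

-- main loop invariant: A's (results, start) and B's (groups, current) stay in step
lemma pv_main (grid : List (List String)) (rows cols : Nat) :
    ∀ (n c : Nat) (resB : List (List (List String))) (stA : Option Nat) (stB : List (List String)),
      c + n = cols →
      ((stA = none ∧ stB = []) ∨
        ∃ s, stA = some s ∧ s < c ∧ stB = (List.range' s (c - s)).map (pvColOf grid rows)) →
      pvFinishA grid rows cols
          ((List.range' c n).foldl (pvStepA grid rows (pvIsSepL grid rows cols))
            (resB.map (pvTranspose rows), stA))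
        = (pvFlushB (((List.range' c n).map (pvColOf grid rows)).foldl pvStepB (resB, stB))).map
            (pvTranspose rows) := by
  intro n
  induction n with
  | zero =>
    intro c resB stA stB hc hst
    simp only [List.range'_zero, List.foldl_nil, List.map_nil]
    rcases hst with ⟨h1, h2⟩ | ⟨s, h1, h2, h3⟩
    · subst h1; subst h2; simp [pvFinishA, pvFlushB]
    · subst h1; subst h3
      have hlen : ¬ ((List.range' s (c - s)).map (pvColOf grid rows)).isEmpty = true := by
        simp; omega
      simp only [pvFinishA, pvFlushB, if_neg hlen, List.map_append, List.map_cons, List.map_nil]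
      rw [pv_transpose_cols]
      have : c = cols := by omega
      subst this
      rfl
  | succ n ih =>
    intro c resB stA stB hc hst
    have hclt : c < cols := by omega
    rw [List.range'_succ, List.foldl_cons, List.map_cons, List.foldl_cons]
    by_cases hsep : ((List.range rows).all (fun r => pvCell grid r c == " ")) = true
    · -- separator column
      have hA : (pvIsSepL grid rows cols).getD c false = true := by
        rw [pv_isSep_getD grid rows cols c hclt]; exact hsep
      have hB : (pvColOf grid rows c).all (fun x => x == " ") = true := by
        rw [pv_col_all]; exact hsep
      rcases hst with ⟨h1, h2⟩ | ⟨s, h1, h2, h3⟩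
      · subst h1; subst h2
        simp only [pvStepA, pvStepB, hA, hB, Bool.not_true, if_false, Bool.false_eq_true,
          List.isEmpty_nil, if_pos]
        exact ih (c + 1) resB none [] (by omega) (Or.inl ⟨rfl, rfl⟩)
      · subst h1; subst h3
        have hlen : ¬ ((List.range' s (c - s)).map (pvColOf grid rows)).isEmpty = true := by
          simp; omega
        simp only [pvStepA, pvStepB, hA, hB, Bool.not_true, if_true, if_neg hlen,
          Bool.false_eq_true, if_false]
        have hres : (resB.map (pvTranspose rows)) ++ [pvSliceA grid rows s c]
            = (resB ++ [(List.range' s (c - s)).map (pvColOf grid rows)]).map (pvTranspose rows) := by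
          rw [List.map_append, List.map_cons, List.map_nil, pv_transpose_cols]
          rfl
        rw [hres]
        exact ih (c + 1) _ none [] (by omega) (Or.inl ⟨rfl, rfl⟩)
    · -- non-separator column
      have hA : (pvIsSepL grid rows cols).getD c false = false := by
        rw [pv_isSep_getD grid rows cols c hclt]; exact Bool.eq_false_iff.mpr hsep
      have hB : (pvColOf grid rows c).all (fun x => x == " ") = false := by
        rw [pv_col_all]; exact Bool.eq_false_iff.mpr hsep
      rcases hst with ⟨h1, h2⟩ | ⟨s, h1, h2, h3⟩
      · subst h1; subst h2
        simp only [pvStepA, pvStepB, hA, hB, Bool.not_false, if_true, Bool.false_eq_true, if_false]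
        refine ih (c + 1) resB (some c) ([] ++ [pvColOf grid rows c]) (by omega)
          (Or.inr ⟨c, rfl, by omega, ?_⟩)
        simp
      · subst h1; subst h3
        simp only [pvStepA, pvStepB, hA, hB, Bool.not_false, if_true, Bool.false_eq_true, if_false]
        refine ih (c + 1) resB (some s) _ (by omega) (Or.inr ⟨s, rfl, by omega, ?_⟩)
        have h4 : c + 1 - s = (c - s) + 1 := by omega
        rw [h4, List.range'_concat]
        have h5 : s + 1 * (c - s) = c := by omega
        rw [h5, List.map_append]
        rfl

-- ===== VERDICT (by name: the statement is the Claim_ definition above) =====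
theorem split_by_empty_columns_spec : Claim_equal_split_by_empty_columns := by
  intro grid _ _
  unfold Spec_split_by_empty_columns
  show pvFinishA grid grid.length (grid.headD []).length
      ((List.range (grid.headD []).length).foldl
        (pvStepA grid grid.length (pvIsSepL grid grid.length (grid.headD []).length)) ([], none))
    = (pvFlushB (((List.range (grid.headD []).length).map (pvColOf grid grid.length)).foldl
        pvStepB ([], []))).map (pvTranspose grid.length)
  rw [List.range_eq_range']
  exact pv_main grid grid.length (grid.headD []).length (grid.headD []).length 0 [] none []
    (by omega) (Or.inl ⟨rfl, rfl⟩)
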